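-- pv_equiv track=rewrite | github.com/NikhilD-UNI/Wind-Coursework---low-carbon-tech | Cable measurement2.py | group_turbines_by_proximity
-- ===== SOURCE A (Python) =====
-- def group_turbines_by_proximity(turbine_coords, threshold=100):
--     rows = []
--     sorted_coords = sorted(turbine_coords, key=lambda coord: coord[1])
--     current_row = [sorted_coords[0]]
--     for coord in sorted_coords[1:]:
--         if abs(coord[1] - current_row[-1][1]) <= threshold:
--             current_row.append(coord)
--         else:
--             rows.append(current_row)
--             current_row = [coord]
--     rows.append(current_row)
--     return rows
-- ===== SOURCE B (Python) =====
-- def group_turbines_by_proximity(turbine_coords, threshold=100):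
--     s = sorted(turbine_coords, key=lambda coord: coord[1])
--     n = len(s)
--     breaks = [i for i in range(1, n) if abs(s[i][1] - s[i - 1][1]) > threshold]
--     bounds = [0] + breaks + [n]
--     return [s[a:b] for a, b in zip(bounds, bounds[1:])]
-- ===== Notes on version B (the rewrite author's own statement) =====
-- stated objective: alternative
-- what changed: Replaces A's single accumulator loop (growing current_row, flushing into rows) by a two-phase boundary-then-slice computation: first collect the break indices where consecutive sorted y-gaps exceed the threshold, then cut the sorted list at those indices.
import Mathlib
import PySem

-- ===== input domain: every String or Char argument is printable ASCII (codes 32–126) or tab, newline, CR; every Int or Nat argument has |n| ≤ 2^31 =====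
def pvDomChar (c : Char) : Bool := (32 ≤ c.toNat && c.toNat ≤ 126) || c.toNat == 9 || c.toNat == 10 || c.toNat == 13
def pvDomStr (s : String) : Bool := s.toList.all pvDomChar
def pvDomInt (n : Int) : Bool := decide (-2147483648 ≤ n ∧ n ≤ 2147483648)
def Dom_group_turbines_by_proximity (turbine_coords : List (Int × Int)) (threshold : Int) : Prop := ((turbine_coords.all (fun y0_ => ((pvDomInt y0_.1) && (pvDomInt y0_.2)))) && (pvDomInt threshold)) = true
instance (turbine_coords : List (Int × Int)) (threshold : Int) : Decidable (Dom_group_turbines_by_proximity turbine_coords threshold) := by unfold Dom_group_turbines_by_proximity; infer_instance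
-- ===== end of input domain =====

-- B replaces A's accumulator loop by a boundary-then-slice computation (same cost, different decomposition).

-- ===== PORT A =====
-- A: sort by y, then one pass growing current_row / flushing it into rows.
-- On empty input A raises IndexError at sorted_coords[0]; that input is excluded by Pre_ below
-- (the [] branch value is arbitrary and not claimed).
def group_turbines_by_proximity (turbine_coords : List (Int × Int)) (threshold : Int) : List (List (Int × Int)) :=
  match PySem.List.sorted turbine_coords (fun coord => coord.2) false with
  | [] => []
  | c0 :: rest =>
    -- current_row[-1] ported as pyGetD st.2 (-1); current_row is never empty on A's path
    let st := rest.foldl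
      (fun (st : List (List (Int × Int)) × List (Int × Int)) coord =>
        if |coord.2 - (PySem.List.pyGetD st.2 (-1) (0, 0)).2| ≤ threshold then
          (st.1, st.2 ++ [coord])
        else
          (st.1 ++ [st.2], [coord]))
      ([], [c0])
    st.1 ++ [st.2]

-- ===== PORT B =====
-- B: sort by y, collect break indices (consecutive y-gap beyond threshold), cut into slices.
def group_turbines_by_proximity_alt (turbine_coords : List (Int × Int)) (threshold : Int) : List (List (Int × Int)) :=
  let s := PySem.List.sorted turbine_coords (fun coord => coord.2) false
  let n : Int := s.length
  let breaks := (PySem.List.pyRange 1 n 1).filter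
    (fun i => decide (|(PySem.List.pyGetD s i (0, 0)).2 - (PySem.List.pyGetD s (i - 1) (0, 0)).2| > threshold))
  let bounds := 0 :: (breaks ++ [n])
  (bounds.zip bounds.tail).map (fun ab => PySem.List.slice s (some ab.1) (some ab.2))

-- ===== PRECONDITION & SPEC =====
-- Pre_ excludes only the empty list, on which A raises IndexError (sorted_coords[0]).
def Pre_group_turbines_by_proximity (turbine_coords : List (Int × Int)) (threshold : Int) : Prop :=
  turbine_coords ≠ []
instance (turbine_coords : List (Int × Int)) (threshold : Int) : Decidable (Pre_group_turbines_by_proximity turbine_coords threshold) := by unfold Pre_group_turbines_by_proximity; infer_instance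

def pvWitness_group_turbines_by_proximity : (List (Int × Int)) × Int := ([(0, 0), (5, 30), (1, 200)], 100)

def Spec_group_turbines_by_proximity (turbine_coords : List (Int × Int)) (threshold : Int) (out : List (List (Int × Int))) : Prop := out = group_turbines_by_proximity_alt turbine_coords threshold
instance (turbine_coords : List (Int × Int)) (threshold : Int) (out : List (List (Int × Int))) : Decidable (Spec_group_turbines_by_proximity turbine_coords threshold out) := by unfold Spec_group_turbines_by_proximity; infer_instance

-- ===== CLAIM (what is proved, stated in full; the proofs are below) =====
def Claim_equal_group_turbines_by_proximity : Prop := ∀ (turbine_coords : List (Int × Int)) (threshold : Int), Dom_group_turbines_by_proximity turbine_coords threshold → Pre_group_turbines_by_proximity turbine_coords threshold → Spec_group_turbines_by_proximity turbine_coords threshold (group_turbines_by_proximity turbine_coords threshold)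

-- ===== LEMMAS AND PROOFS =====

-- A's loop body, named for the proofs.
def pvStep (threshold : Int) (st : List (List (Int × Int)) × List (Int × Int)) (coord : Int × Int) :
    List (List (Int × Int)) × List (Int × Int) :=
  if |coord.2 - (PySem.List.pyGetD st.2 (-1) (0, 0)).2| ≤ threshold then
    (st.1, st.2 ++ [coord])
  else
    (st.1 ++ [st.2], [coord])

-- canonical recursive grouping of a head element and the remaining (sorted) list
def pvChunk (threshold : Int) : (Int × Int) → List (Int × Int) → List (List (Int × Int))
  | x, [] => [[x]]
  | x, y :: t =>
    if |y.2 - x.2| ≤ threshold then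
      match pvChunk threshold y t with
      | [] => [[x]]
      | g :: gs => (x :: g) :: gs
    else [x] :: pvChunk threshold y t

theorem pvChunk_ne_nil (threshold : Int) (x : Int × Int) (r : List (Int × Int)) :
    pvChunk threshold x r ≠ [] := by
  cases r with
  | nil => simp [pvChunk]
  | cons y t =>
    simp only [pvChunk]
    split_ifs
    · rcases h : pvChunk threshold y t with _ | ⟨g, gs⟩ <;> simp
    · simp

-- B's pieces, named for the proofs.
def pvBreaks (threshold : Int) (s : List (Int × Int)) : List Int :=
  (PySem.List.pyRange 1 (s.length : Int) 1).filter
    (fun i => decide (|(PySem.List.pyGetD s i (0, 0)).2 - (PySem.List.pyGetD s (i - 1) (0, 0)).2| > threshold))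

def pvGroups (s : List (Int × Int)) (bounds : List Int) : List (List (Int × Int)) :=
  (bounds.zip bounds.tail).map (fun ab => PySem.List.slice s (some ab.1) (some ab.2))

def pvBCore (threshold : Int) (s : List (Int × Int)) : List (List (Int × Int)) :=
  pvGroups s (0 :: (pvBreaks threshold s ++ [(s.length : Int)]))

theorem pvAlt_eq_bcore (turbine_coords : List (Int × Int)) (threshold : Int) :
    group_turbines_by_proximity_alt turbine_coords threshold
      = pvBCore threshold (PySem.List.sorted turbine_coords (fun coord => coord.2) false) := rfl

-- ---- A-side: the fold computes pvChunk ----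
theorem pvFoldA (threshold : Int) (rest : List (Int × Int)) :
    ∀ (rows : List (List (Int × Int))) (cur : List (Int × Int)) (x : Int × Int),
      (rest.foldl (pvStep threshold) (rows, cur ++ [x])).1
          ++ [(rest.foldl (pvStep threshold) (rows, cur ++ [x])).2]
        = rows ++ (cur ++ (pvChunk threshold x rest).headI) :: (pvChunk threshold x rest).tail := by
  induction rest with
  | nil => intro rows cur x; simp [pvChunk]
  | cons c t ih =>
    intro rows cur x
    rw [List.foldl_cons]
    show (t.foldl (pvStep threshold) (pvStep threshold (rows, cur ++ [x]) c)).1 ++ _ = _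
    rw [pvStep]
    simp only [PySem.List.pyGetD_neg_one_append_singleton]
    by_cases h : |c.2 - x.2| ≤ threshold
    · rw [if_pos h]
      have := ih rows (cur ++ [x]) c
      rcases hc : pvChunk threshold c t with _ | ⟨g, gs⟩
      · exact absurd hc (pvChunk_ne_nil threshold c t)
      · rw [hc] at this
        simp only [List.headI, List.tail] at this ⊢
        rw [this]
        simp [pvChunk, h, hc, List.append_assoc]
    · rw [if_neg h]
      have := ih (rows ++ [cur ++ [x]]) [] c
      simp only [List.nil_append] at this
      rw [this]
      rcases hc : pvChunk threshold c t with _ | ⟨g, gs⟩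
      · exact absurd hc (pvChunk_ne_nil threshold c t)
      · simp [pvChunk, h, hc, List.headI, List.tail]

theorem pvA_eq_chunk (threshold : Int) (c0 : Int × Int) (rest tc : List (Int × Int))
    (hs : PySem.List.sorted tc (fun coord => coord.2) false = c0 :: rest) :
    group_turbines_by_proximity tc threshold = pvChunk threshold c0 rest := by
  unfold group_turbines_by_proximity
  rw [hs]
  have h := pvFoldA threshold rest [] [] c0
  show (rest.foldl (pvStep threshold) ([], [c0])).1 ++ [(rest.foldl (pvStep threshold) ([], [c0])).2] = _
  rw [show (([], [c0]) : List (List (Int × Int)) × List (Int × Int)) = ([], [] ++ [c0]) from rfl, h]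
  rcases hc : pvChunk threshold c0 rest with _ | ⟨g, gs⟩
  · exact absurd hc (pvChunk_ne_nil threshold c0 rest)
  · simp [List.headI, List.tail]

-- ---- B-side helper lemmas ----
theorem pvRange_shift (a b : Int) :
    PySem.List.pyRange (a + 1) (b + 1) 1 = (PySem.List.pyRange a b 1).map (· + 1) := by
  rw [PySem.List.pyRange_of_pos (a + 1) (b + 1) (by norm_num),
      PySem.List.pyRange_of_pos a b (by norm_num), List.map_map]
  by_cases hab : a < b
  · rw [if_pos (by omega : a + 1 < b + 1), if_pos hab,
        show (b + 1 - (a + 1) + 1 - 1) = (b - a + 1 - 1) by ring]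
    exact List.map_congr_left (fun k _ => by simp [Function.comp]; ring)
  · rw [if_neg (by omega : ¬ (a + 1 < b + 1)), if_neg hab]; simp

theorem pvSlice_shift (x : Int × Int) (s' : List (Int × Int)) (a b : Int)
    (ha : 0 ≤ a) (hb : 0 ≤ b) :
    PySem.List.slice (x :: s') (some (a + 1)) (some (b + 1)) = PySem.List.slice s' (some a) (some b) := by
  rw [PySem.List.slice_toNat _ (by omega) (by omega), PySem.List.slice_toNat _ ha hb]
  rw [show (a + 1).toNat = a.toNat + 1 by omega, List.drop_succ_cons]
  congr 1
  omega

theorem pvSlice_head (x : Int × Int) (s' : List (Int × Int)) (b : Int) (hb : 0 ≤ b) :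
    PySem.List.slice (x :: s') (some 0) (some (b + 1)) = x :: PySem.List.slice s' (some 0) (some b) := by
  rw [PySem.List.slice_toNat _ (by omega) (by omega), PySem.List.slice_toNat _ le_rfl hb]
  simp only [List.drop_zero, Int.toNat_zero, Nat.sub_zero]
  rw [show (b + 1).toNat = b.toNat + 1 by omega, List.take_succ_cons]

theorem pvGroups_shift (x : Int × Int) (s' : List (Int × Int)) (l : List Int)
    (h : ∀ a ∈ l, 0 ≤ a) :
    pvGroups (x :: s') (l.map (· + 1)) = pvGroups s' l := by
  unfold pvGroups
  rw [← List.map_tail, List.zip_map, List.map_map]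
  refine List.map_congr_left (fun p hp => ?_)
  rcases List.of_mem_zip hp with ⟨h1, h2⟩
  exact pvSlice_shift x s' p.1 p.2 (h _ h1) (h _ (List.mem_of_mem_tail h2))

theorem pvGroups_cons_shift (x : Int × Int) (s' : List (Int × Int)) (l : List Int)
    (h : ∀ a ∈ l, 0 ≤ a) :
    pvGroups (x :: s') (0 :: 1 :: l.map (· + 1))
      = PySem.List.slice (x :: s') (some 0) (some 1) :: pvGroups s' (0 :: l) := by
  have hsh := pvGroups_shift x s' (0 :: l)
    (by intro a ha
        rcases List.mem_cons.mp ha with h' | h'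
        · omega
        · exact h a h')
  have hm : ((0 : Int) :: l).map (· + 1) = 1 :: l.map (· + 1) := by simp
  rw [hm] at hsh
  unfold pvGroups at hsh ⊢
  simp only [List.tail_cons] at hsh ⊢
  rw [List.zip_cons_cons, List.map_cons]
  congr 1

theorem pvGroups_zero_cons (s' : List (Int × Int)) (b0 : Int) (l' : List Int) :
    pvGroups s' (0 :: b0 :: l')
      = PySem.List.slice s' (some 0) (some b0) :: pvGroups s' (b0 :: l') := by
  unfold pvGroups
  simp only [List.tail_cons]
  rw [List.zip_cons_cons, List.map_cons]

theorem pvGroups_zero_cons_shift (x : Int × Int) (s' : List (Int × Int)) (b0 : Int) (l' : List Int)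
    (h : ∀ a ∈ b0 :: l', 0 ≤ a) :
    pvGroups (x :: s') (0 :: (b0 :: l').map (· + 1))
      = (x :: PySem.List.slice s' (some 0) (some b0)) :: pvGroups s' (b0 :: l') := by
  have hsh := pvGroups_shift x s' (b0 :: l') h
  unfold pvGroups at hsh ⊢
  simp only [List.map_cons, List.tail_cons] at hsh ⊢
  rw [List.zip_cons_cons, List.map_cons]
  congr 1
  exact pvSlice_head x s' b0 (h b0 (List.mem_cons_self))

theorem pvBreaks_cons (threshold : Int) (x y : Int × Int) (t : List (Int × Int)) :
    pvBreaks threshold (x :: y :: t)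
      = (if |y.2 - x.2| > threshold then [(1 : Int)] else [])
          ++ (pvBreaks threshold (y :: t)).map (· + 1) := by
  unfold pvBreaks
  have h1 : PySem.List.pyGetD (x :: y :: t) (1 : Int) ((0 : Int), (0 : Int)) = y := by
    rw [PySem.List.pyGetD_of_nonneg _ _ (by norm_num)]; rfl
  have h0 : PySem.List.pyGetD (x :: y :: t) ((1 : Int) - 1) ((0 : Int), (0 : Int)) = x := by
    rw [show ((1 : Int) - 1) = 0 from rfl, PySem.List.pyGetD_of_nonneg _ _ le_rfl]; rfl
  have hlen : (((x :: y :: t).length : Int)) = (((y :: t).length : Int)) + 1 := by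
    simp only [List.length_cons]; push_cast; ring
  have hpos : (1 : Int) < ((y :: t).length : Int) + 1 := by
    simp only [List.length_cons]; push_cast; omega
  rw [hlen, PySem.List.pyRange_one_cons hpos, pvRange_shift 1 (((y :: t).length : Int)),
      List.filter_cons, List.filter_map]
  have hfil : List.filter
        ((fun i => decide (|(PySem.List.pyGetD (x :: y :: t) i ((0:Int),(0:Int))).2
            - (PySem.List.pyGetD (x :: y :: t) (i - 1) ((0:Int),(0:Int))).2| > threshold))
          ∘ (fun i : Int => i + 1)) (PySem.List.pyRange 1 (((y :: t).length : Int)) 1)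
      = List.filter
        (fun i => decide (|(PySem.List.pyGetD (y :: t) i ((0:Int),(0:Int))).2
            - (PySem.List.pyGetD (y :: t) (i - 1) ((0:Int),(0:Int))).2| > threshold))
        (PySem.List.pyRange 1 (((y :: t).length : Int)) 1) := by
    refine List.filter_congr (fun i hi => ?_)
    rcases PySem.List.mem_pyRange_one.mp hi with ⟨hi1, _⟩
    have e1 : PySem.List.pyGetD (x :: y :: t) (i + 1) ((0 : Int), (0 : Int))
        = PySem.List.pyGetD (y :: t) i ((0 : Int), (0 : Int)) := by
      rw [PySem.List.pyGetD_of_nonneg _ _ (by omega), PySem.List.pyGetD_of_nonneg _ _ (by omega),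
          show (i + 1).toNat = i.toNat + 1 by omega]
      rfl
    have e0 : PySem.List.pyGetD (x :: y :: t) (i + 1 - 1) ((0 : Int), (0 : Int))
        = PySem.List.pyGetD (y :: t) (i - 1) ((0 : Int), (0 : Int)) := by
      rw [PySem.List.pyGetD_of_nonneg _ _ (by omega), PySem.List.pyGetD_of_nonneg _ _ (by omega),
          show (i + 1 - 1).toNat = (i - 1).toNat + 1 by omega]
      rfl
    simp only [Function.comp_apply, e1, e0]
  rw [hfil]
  simp only [h1, h0, decide_eq_true_eq]
  split_ifs with hg <;> simp

theorem pvBreaks_nonneg (threshold : Int) (s : List (Int × Int)) :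
    ∀ a ∈ pvBreaks threshold s ++ [(s.length : Int)], 0 ≤ a := by
  intro a ha
  rcases List.mem_append.mp ha with h | h
  · rcases List.mem_filter.mp h with ⟨hm, _⟩
    rcases PySem.List.mem_pyRange_one.mp hm with ⟨h1, _⟩
    omega
  · simp only [List.mem_singleton] at h
    omega

-- ---- B-side: pvBCore computes pvChunk ----
theorem pvB_eq_chunk (threshold : Int) (r : List (Int × Int)) :
    ∀ (x : Int × Int), pvBCore threshold (x :: r) = pvChunk threshold x r := by
  induction r with
  | nil =>
    intro x
    unfold pvBCore pvBreaks
    have hr : PySem.List.pyRange (1 : Int) (([x] : List (Int × Int)).length : Int) 1 = [] := by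
      rw [PySem.List.pyRange_of_pos 1 _ (by norm_num)]
      simp
    rw [hr]
    simp only [List.filter_nil, List.nil_append, List.length_singleton, Nat.cast_one]
    unfold pvGroups
    simp only [List.tail_cons, List.zip_cons_cons, List.zip_nil_right, List.map_cons, List.map_nil]
    rw [PySem.List.slice_toNat _ le_rfl (by norm_num)]
    rfl
  | cons y t ih =>
    intro x
    have hnn := pvBreaks_nonneg threshold (y :: t)
    have hlen2 : (((x :: y :: t).length : Int)) = (((y :: t).length : Int)) + 1 := by
      simp only [List.length_cons]; push_cast; ring
    have hmap' : (pvBreaks threshold (y :: t)).map (· + 1) ++ [(((x :: y :: t).length : Int))]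
        = (pvBreaks threshold (y :: t) ++ [(((y :: t).length : Int))]).map (· + 1) := by
      rw [hlen2, List.map_append]
      simp
    unfold pvBCore
    rw [pvBreaks_cons]
    by_cases hg : |y.2 - x.2| > threshold
    · rw [if_pos hg]
      have hb : (([(1 : Int)] ++ (pvBreaks threshold (y :: t)).map (· + 1))
            ++ [(((x :: y :: t).length : Int))])
          = 1 :: (pvBreaks threshold (y :: t) ++ [(((y :: t).length : Int))]).map (· + 1) := by
        rw [List.append_assoc, hmap', List.singleton_append]
      rw [hb, pvGroups_cons_shift x (y :: t) _ hnn]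
      have hsl : PySem.List.slice (x :: y :: t) (some 0) (some 1) = [x] := by
        rw [PySem.List.slice_toNat _ le_rfl (by norm_num)]
        rfl
      rw [hsl]
      have hcy : pvGroups (y :: t)
            (0 :: (pvBreaks threshold (y :: t) ++ [(((y :: t).length : Int))]))
          = pvChunk threshold y t := ih y
      rw [hcy]
      simp only [pvChunk]
      rw [if_neg (not_le.mpr hg)]
    · rw [if_neg hg, List.nil_append, hmap']
      rcases hB : pvBreaks threshold (y :: t) ++ [(((y :: t).length : Int))] with _ | ⟨b0, l'⟩
      · exact absurd hB (by simp)
      rw [hB] at hnn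
      rw [pvGroups_zero_cons_shift x (y :: t) b0 l' hnn]
      have hcy : PySem.List.slice (y :: t) (some 0) (some b0) :: pvGroups (y :: t) (b0 :: l')
          = pvChunk threshold y t := by
        rw [← pvGroups_zero_cons, ← hB]
        exact ih y
      simp only [pvChunk]
      rw [if_pos (not_lt.mp hg), ← hcy]

-- ===== VERDICT (by name: the statement is the Claim_ definition above) =====
theorem group_turbines_by_proximity_spec : Claim_equal_group_turbines_by_proximity := by
  intro tc threshold _ hpre
  unfold Spec_group_turbines_by_proximity
  rcases hs : PySem.List.sorted tc (fun coord => coord.2) false with _ | ⟨c0, rest⟩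
  · exact absurd ((PySem.List.sorted_eq_nil_iff tc _ false).mp hs) hpre
  · rw [pvA_eq_chunk threshold c0 rest tc hs, pvAlt_eq_bcore, hs, pvB_eq_chunk]
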